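-- pv_equiv track=rewrite | github.com/Hoai-Baoo/UIT_CAR | viam_hcmut.py | cal_center
-- ===== SOURCE A (Python) =====
-- def cal_center(line):
--     arr = []
--     for x, y in enumerate(line):
--         if y == 255:
--             arr.append(x)
--     arrmax = max(arr)
--     arrmin = min(arr)
--     center = int((arrmax+arrmin)/2)
--     return center
-- ===== SOURCE B (Python) =====
-- def cal_center(line):
--     first = line.index(255)
--     last = len(line) - 1 - line[::-1].index(255)
--     return int((first + last) / 2)
-- ===== Notes on version B (the rewrite author's own statement) =====
-- stated objective: simpler
-- what changed: Instead of collecting every index of 255 into a list and reducing it with max/min, B locates the first 255 with line.index and the last 255 by searching the reversed list, then averages the two indices.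
import Mathlib
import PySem

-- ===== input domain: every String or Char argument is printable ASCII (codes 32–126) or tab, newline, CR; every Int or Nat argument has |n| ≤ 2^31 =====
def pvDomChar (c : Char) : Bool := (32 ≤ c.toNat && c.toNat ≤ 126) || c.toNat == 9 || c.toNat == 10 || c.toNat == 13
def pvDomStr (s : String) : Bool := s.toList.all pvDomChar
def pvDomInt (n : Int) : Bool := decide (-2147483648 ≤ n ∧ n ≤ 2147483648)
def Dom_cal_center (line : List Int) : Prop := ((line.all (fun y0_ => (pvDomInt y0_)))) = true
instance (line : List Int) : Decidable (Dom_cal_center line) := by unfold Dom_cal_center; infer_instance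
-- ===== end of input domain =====

-- B replaces A's list of all 255-indices reduced by max/min with direct first/last searches
-- (line.index(255) and a reversed-list index), a simpler O(1)-extra-state formulation.

-- ===== PORT A =====
def cal_center (line : List Int) : Int :=
  let arr := (PySem.List.enumerate line).foldl
    (fun acc p => if p.2 == 255 then acc ++ [p.1] else acc) []
  match PySem.List.max? arr (fun x => x), PySem.List.min? arr (fun x => x) with
  | some arrmax, some arrmin => PySem.Int.truncdiv (arrmax + arrmin) 2
  | _, _ => 0  -- unreachable under Pre_ (max()/min() of the empty list raises ValueError)

-- ===== PORT B =====
def cal_center_alt (line : List Int) : Int :=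
  match PySem.List.index? line 255 with
  | none => 0  -- unreachable under Pre_ (.index raises ValueError)
  | some first =>
    match PySem.List.index? line.reverse 255 with
    | none => 0  -- unreachable under Pre_
    | some ridx =>
        PySem.Int.truncdiv ((first : Int) + ((line.length : Int) - 1 - (ridx : Int))) 2

-- ===== PRECONDITION & SPEC =====
-- A raises ValueError (max of empty list) when 255 does not occur in line; B's .index raises there too.
def Pre_cal_center (line : List Int) : Prop := (255 : Int) ∈ line
instance (line : List Int) : Decidable (Pre_cal_center line) := by unfold Pre_cal_center; infer_instance
def pvWitness_cal_center : List Int := [0, 255, 7, 255, 0]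

def Spec_cal_center (line : List Int) (out : Int) : Prop := out = cal_center_alt line
instance (line : List Int) (out : Int) : Decidable (Spec_cal_center line out) := by unfold Spec_cal_center; infer_instance

-- ===== CLAIM (what is proved, stated in full; the proofs are below) =====
def Claim_equal_cal_center : Prop := ∀ (line : List Int), Dom_cal_center line → Pre_cal_center line → Spec_cal_center line (cal_center line)

-- ===== LEMMAS AND PROOFS =====

-- membership in A's accumulated index list
theorem mem_arr_iff (xs : List Int) (z : Int) :
    z ∈ ((PySem.List.enumerate xs).filter (fun p => p.2 == 255)).map (·.1) ↔
      ∃ (k : Nat) (h : k < xs.length), z = (k : Int) ∧ xs[k] = 255 := by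
  simp only [List.mem_map, List.mem_filter, PySem.List.mem_enumerate_iff]
  constructor
  · rintro ⟨⟨i, v⟩, ⟨⟨k, hk, hkv⟩, hv⟩, rfl⟩
    cases hkv
    exact ⟨k, hk, by simp, by simpa using hv⟩
  · rintro ⟨k, hk, rfl, hv⟩
    exact ⟨((k : Int), xs[k]), ⟨⟨k, hk, by simp⟩, by simp [hv]⟩, rfl⟩

-- the minimum of A's index list is the first index of 255
theorem min_eq_first (xs : List Int) (m : Int)
    (hmin : PySem.List.min? (((PySem.List.enumerate xs).filter (fun p => p.2 == 255)).map (·.1)) (fun x => x) = some m)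
    (j : Nat) (hj : PySem.List.index? xs 255 = some j) : m = (j : Int) := by
  obtain ⟨hjlt, hjv, hjfirst⟩ := PySem.List.getElem_of_index?_eq_some hj
  have hjmem : (j : Int) ∈ ((PySem.List.enumerate xs).filter (fun p => p.2 == 255)).map (·.1) :=
    (mem_arr_iff xs _).2 ⟨j, hjlt, rfl, hjv⟩
  have h1 : m ≤ (j : Int) := PySem.List.min?_isMin hmin _ hjmem
  have hm := (mem_arr_iff xs m).1 (PySem.List.min?_mem hmin)
  obtain ⟨k, hk, rfl, hkv⟩ := hm
  have : ¬ k < j := fun h => hjfirst k h hkv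
  omega

-- the maximum of A's index list is len - 1 - (first index of 255 in the reversed list)
theorem max_eq_last (xs : List Int) (M : Int)
    (hmax : PySem.List.max? (((PySem.List.enumerate xs).filter (fun p => p.2 == 255)).map (·.1)) (fun x => x) = some M)
    (r : Nat) (hr : PySem.List.index? xs.reverse 255 = some r) :
    M = (xs.length : Int) - 1 - (r : Int) := by
  obtain ⟨hrlt, hrv, hrfirst⟩ := PySem.List.getElem_of_index?_eq_some hr
  have hlen : xs.reverse.length = xs.length := xs.length_reverse
  have hrlt' : r < xs.length := by omega
  have hval : xs[xs.length - 1 - r]'(by omega) = 255 := by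
    have := List.getElem_reverse (l := xs) (i := r) (by omega)
    rw [hrv] at this; exact this.symm
  have hmem : ((xs.length - 1 - r : Nat) : Int) ∈
      ((PySem.List.enumerate xs).filter (fun p => p.2 == 255)).map (·.1) :=
    (mem_arr_iff xs _).2 ⟨xs.length - 1 - r, by omega, rfl, hval⟩
  have h1 : ((xs.length - 1 - r : Nat) : Int) ≤ M := PySem.List.max?_isMax hmax _ hmem
  obtain ⟨k, hk, rfl, hkv⟩ := (mem_arr_iff xs M).1 (PySem.List.max?_mem hmax)
  -- the reversed list has 255 at position len-1-k, so r ≤ len-1-k, i.e. k ≤ len-1-r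
  have hrevv : xs.reverse[xs.length - 1 - k]'(by omega) = 255 := by
    have := List.getElem_reverse (l := xs) (i := xs.length - 1 - k) (by omega)
    have hke : xs.length - 1 - (xs.length - 1 - k) = k := by omega
    rw [this]
    simp only [hke]
    exact hkv
  have : ¬ xs.length - 1 - k < r := fun h => hrfirst _ h hrevv
  omega

-- ===== VERDICT (by name: the statement is the Claim_ definition above) =====
theorem cal_center_spec : Claim_equal_cal_center := by
  intro xs _ hpre
  unfold Spec_cal_center cal_center cal_center_alt
  rw [PySem.List.foldl_append_if]
  simp only [List.nil_append]
  set arr := ((PySem.List.enumerate xs).filter (fun p => p.2 == 255)).map (·.1) with harr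
  have hne : arr ≠ [] := by
    have hmem : (255 : Int) ∈ xs := hpre
    obtain ⟨k, hk, hv⟩ := List.mem_iff_getElem.1 hmem
    exact List.ne_nil_of_mem ((mem_arr_iff xs (k : Int)).2 ⟨k, hk, rfl, hv⟩)
  obtain ⟨M, hM⟩ := Option.ne_none_iff_exists'.1 (mt (PySem.List.max?_eq_none_iff arr (fun x : Int => x)).1 hne)
  obtain ⟨m, hm⟩ := Option.ne_none_iff_exists'.1 (mt (PySem.List.min?_eq_none_iff arr (fun x : Int => x)).1 hne)
  have hfir : PySem.List.index? xs 255 ≠ none := by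
    simp only [ne_eq, PySem.List.index?_eq_none_iff]; exact fun h => h hpre
  obtain ⟨j, hj⟩ := Option.ne_none_iff_exists'.1 hfir
  have hrid : PySem.List.index? xs.reverse 255 ≠ none := by
    simp only [ne_eq, PySem.List.index?_eq_none_iff]; simpa using hpre
  obtain ⟨r, hr⟩ := Option.ne_none_iff_exists'.1 hrid
  rw [hM, hm, hj, hr]
  rw [min_eq_first xs m hm j hj, max_eq_last xs M hM r hr]
  ring_nf
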